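-- pv_equiv track=rewrite | github.com/tjsander/advent2023 | day15/day15.py | get_label_hash_values
-- ===== SOURCE A (Python) =====
-- def get_label_hash_values(problems):
--     boxes = []
--     for x in range (256):
--         boxes.append([])
--     for problem in problems:
--         current_val = 0
--         c_string = ""
--         for char in problem:
--             if char == "=":
--                 found = False
--                 for box in boxes[current_val]:
--                     if c_string == box[0]:
--                         box[1] = problem.split("=")[1]
--                         found = True
--                         break
--                 if not found:
--                     boxes[current_val].append(problem.split("="))
--                 break
--             if char == "-":
--                 for box in boxes[current_val]:
--                     if c_string == box[0]:
--                         boxes[current_val].remove(box)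
--                         break
--                 break
--             c_string += char
--             current_val += ord(char)
--             current_val = current_val * 17
--             current_val = current_val % 256
--     return boxes
-- ===== SOURCE B (Python) =====
-- def get_label_hash_values(problems):
--     # One ordered dict of lenses (label -> its stored split-list), bucketed by hash once at the end.
--     lenses = {}
--     for p in problems:
--         i = next((k for k, c in enumerate(p) if c in "=-"), None)
--         if i is None:
--             continue
--         label = p[:i]
--         if p[i] == "=":
--             parts = p.split("=")
--             if label in lenses:
--                 lenses[label][1] = parts[1]
--             else:
--                 lenses[label] = parts
--         elif label in lenses:
--             del lenses[label]
--     boxes = [[] for _ in range(256)]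
--     for label, entry in lenses.items():
--         h = 0
--         for c in label:
--             h = (h + ord(c)) * 17 % 256
--         boxes[h].append(entry)
--     return boxes
-- ===== Notes on version B (the rewrite author's own statement) =====
-- stated objective: alternative
-- what changed: A threads 256 mutable boxes through a stateful per-character scan (incremental hash, found-flag inner loops, early breaks); B never touches boxes while processing: it folds all operations into ONE insertion-ordered dict of lenses keyed by label (update value / insert / delete), and only afterwards distributes the surviving entries into the 256 boxes by hashing each label once in a final grouping pass.
import Mathlib
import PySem

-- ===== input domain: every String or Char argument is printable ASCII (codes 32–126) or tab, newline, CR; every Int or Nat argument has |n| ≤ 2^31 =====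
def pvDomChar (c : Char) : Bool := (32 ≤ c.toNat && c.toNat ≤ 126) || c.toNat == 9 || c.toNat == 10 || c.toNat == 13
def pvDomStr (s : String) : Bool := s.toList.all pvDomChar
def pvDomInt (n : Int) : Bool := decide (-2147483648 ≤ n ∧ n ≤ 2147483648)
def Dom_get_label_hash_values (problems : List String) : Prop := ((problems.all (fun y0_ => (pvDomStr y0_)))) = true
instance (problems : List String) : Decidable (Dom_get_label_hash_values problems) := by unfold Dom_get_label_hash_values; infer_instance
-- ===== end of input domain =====

-- B replaces A's 256 mutable boxes threaded through a stateful character scan by ONE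
-- insertion-ordered dict of lenses keyed by label, bucketed into the 256 boxes only
-- in a single final grouping pass; objective: alternative decomposition, same cost.

-- ===== PORT A =====
-- inner loop "for box in boxes[current_val]" of the '=' branch: update first label match, else append
def pvUpdA (lst : List (List String)) (label : List Char) (parts : List String) : List (List String) :=
  match lst with
  | [] => [parts]
  | box :: rest =>
    if (box.getD 0 "").toList == label then box.set 1 (parts.getD 1 "") :: rest
    else box :: pvUpdA rest label parts

-- inner loop of the '-' branch: remove first label match
def pvDelA (lst : List (List String)) (label : List Char) : List (List String) :=
  match lst with
  | [] => []
  | box :: rest =>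
    if (box.getD 0 "").toList == label then rest
    else box :: pvDelA rest label

-- the "for char in problem" scan: state = (current_val, c_string), early break on '=' / '-'
def pvScanA (boxes : List (List (List String))) (problem : String) :
    List Char → Nat → List Char → List (List (List String))
  | [], _, _ => boxes
  | c :: rest, cv, cs =>
    if c == '=' then
      boxes.set cv (pvUpdA (boxes.getD cv []) cs ((PySem.Str.split? problem "=").getD []))
    else if c == '-' then
      boxes.set cv (pvDelA (boxes.getD cv []) cs)
    else
      pvScanA boxes problem rest ((cv + c.toNat) * 17 % 256) (cs ++ [c])

def get_label_hash_values (problems : List String) : List (List (List String)) :=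
  let boxes := (PySem.List.pyRange 0 256 1).foldl (fun (b : List (List (List String))) _ => b ++ [[]]) []
  problems.foldl (fun b p => pvScanA b p p.toList 0 []) boxes

-- ===== PORT B =====
-- label hash (used once per surviving lens in the final grouping pass):
-- h = 0; for c in label: h = (h + ord(c)) * 17 % 256
def pvHashB (label : List Char) : Nat :=
  label.foldl (fun h c => (h + c.toNat) * 17 % 256) 0

-- lenses[label][1] = x  on the insertion-ordered dict (unique keys: first match)
def pvSetVal (d : List (String × List String)) (s : String) (x : String) :
    List (String × List String) :=
  match d with
  | [] => []
  | e :: rest => if e.1 == s then (e.1, e.2.set 1 x) :: rest else e :: pvSetVal rest s x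

-- del lenses[label]
def pvDelKey (d : List (String × List String)) (s : String) : List (String × List String) :=
  match d with
  | [] => []
  | e :: rest => if e.1 == s then rest else e :: pvDelKey rest s

-- one problem folded into the dict of lenses
def pvStepB (d : List (String × List String)) (p : String) : List (String × List String) :=
  match p.toList.findIdx? (fun c => c == '=' || c == '-') with
  | none => d
  | some i =>
    let label := String.ofList (p.toList.take i)
    if p.toList.getD i ' ' == '=' then
      let parts := (PySem.Str.split? p "=").getD []
      if d.any (fun e => e.1 == label) then pvSetVal d label (parts.getD 1 "")
      else d ++ [(label, parts)]
    else
      if d.any (fun e => e.1 == label) then pvDelKey d label else d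

def get_label_hash_values_alt (problems : List String) : List (List (List String)) :=
  let lenses := problems.foldl pvStepB []
  lenses.foldl
    (fun boxes e =>
      boxes.set (pvHashB e.1.toList) ((boxes.getD (pvHashB e.1.toList) []) ++ [e.2]))
    (List.replicate 256 [])

-- ===== PRECONDITION & SPEC =====
def Spec_get_label_hash_values (problems : List String) (out : List (List (List String))) : Prop := out = get_label_hash_values_alt problems
instance (problems : List String) (out : List (List (List String))) : Decidable (Spec_get_label_hash_values problems out) := by unfold Spec_get_label_hash_values; infer_instance

-- ===== CLAIM (what is proved, stated in full; the proofs are below) =====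
def Claim_equal_get_label_hash_values : Prop := ∀ (problems : List String), Dom_get_label_hash_values problems → Spec_get_label_hash_values problems (get_label_hash_values problems)

-- ===== LEMMAS AND PROOFS =====

-- the contents of box h, read off the dict: values of the entries whose key hashes to h
def pvG (d : List (String × List String)) (h : Nat) : List (List String) :=
  (d.filter (fun e => pvHashB e.1.toList == h)).map Prod.snd

-- invariant of B's dict: every stored value's element 0 is its key
def pvInvP (d : List (String × List String)) : Prop :=
  ∀ e ∈ d, e.2.getD 0 "" = e.1

theorem pvHashB_lt (L : List Char) : pvHashB L < 256 := by
  unfold pvHashB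
  induction L using List.reverseRecOn with
  | nil => simp
  | append_singleton M c _ => rw [List.foldl_append]; simp [Nat.mod_lt]

theorem pvSet1_getD0 (v : List String) (x : String) : (v.set 1 x).getD 0 "" = v.getD 0 "" := by
  cases v with
  | nil => rfl
  | cons a t => cases t <;> rfl

-- A's char scan, started with consumed prefix cs and hash state cv, equals the
-- locate-operator / hash-the-label decomposition of the remaining characters.
theorem pvScanA_eq (rest : List Char) (cv : Nat) (cs : List Char)
    (boxes : List (List (List String))) (p : String)
    (hcv : cv = cs.foldl (fun h c => (h + c.toNat) * 17 % 256) 0) :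
    pvScanA boxes p rest cv cs =
      match rest.findIdx? (fun c => c == '=' || c == '-') with
      | none => boxes
      | some i =>
        let label := cs ++ rest.take i
        let h := pvHashB label
        if rest.getD i ' ' == '=' then
          boxes.set h (pvUpdA (boxes.getD h []) label ((PySem.Str.split? p "=").getD []))
        else
          boxes.set h (pvDelA (boxes.getD h []) label) := by
  induction rest generalizing cv cs with
  | nil => simp [pvScanA]
  | cons c rest ih =>
    by_cases he : c = '='
    · subst he
      simp [pvScanA, List.findIdx?_cons, pvHashB, hcv]
    · by_cases hd : c = '-'
      · subst hd
        simp [pvScanA, List.findIdx?_cons, pvHashB, hcv]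
      · have hop : ((c == '=') || (c == '-')) = false := by
          simp [he, hd]
        have hstep : (cv + c.toNat) * 17 % 256
            = (cs ++ [c]).foldl (fun h c => (h + c.toNat) * 17 % 256) 0 := by
          simp [hcv, List.foldl_append]
        rw [show pvScanA boxes p (c :: rest) cv cs
              = pvScanA boxes p rest ((cv + c.toNat) * 17 % 256) (cs ++ [c]) by
            simp [pvScanA, he, hd]]
        rw [ih _ _ hstep]
        simp only [List.findIdx?_cons, hop]
        cases hf : rest.findIdx? (fun c => c == '=' || c == '-') with
        | none => simp
        | some i => simp [List.take_succ_cons]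

-- the two initial 256-empty-box lists coincide
set_option maxRecDepth 8192 in
theorem pvInit_eq :
    ((PySem.List.pyRange 0 256 1).foldl (fun (b : List (List (List String))) _ => b ++ [[]]) [])
      = List.replicate 256 [] := by decide

-- ((range n).map g).set h v rewritten pointwise
theorem pvSetMapRange {α : Type} (g : Nat → α) (n h : Nat) (v : α) (_hh : h < n) :
    ((List.range n).map g).set h v = (List.range n).map (fun k => if k = h then v else g k) := by
  apply List.ext_getElem
  · simp
  · intro j h1 h2
    simp only [List.length_set, List.length_map, List.length_range] at h1
    rw [List.getElem_set]
    by_cases hj : h = j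
    · simp [hj]
    · simp [hj, Ne.symm hj]

theorem pvGetDMapRange {α : Type} (g : Nat → α) (n h : Nat) (d : α) (hh : h < n) :
    ((List.range n).map g).getD h d = g h := by
  rw [List.getD_eq_getElem?_getD]
  simp [hh]

-- under the invariant, A's box-entry match (on element 0) is B's key match
theorem pvMatch_eq (e : String × List String) (L : List Char)
    (hinv : e.2.getD 0 "" = e.1) :
    (((e.2.getD 0 "").toList == L) : Bool) = (e.1 == String.ofList L) := by
  rw [hinv]
  by_cases h : e.1 = String.ofList L
  · simp [h]
  · have : e.1.toList ≠ L := by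
      intro hl
      exact h (by rw [← hl]; exact (String.ofList_toList (s := e.1)).symm)
    simp [h, this]

-- present key, '=' branch: pvSetVal on the dict is pvUpdA inside box (hash L), identity elsewhere
theorem pvG_cons (e : String × List String) (rest : List (String × List String)) (k : Nat) :
    pvG (e :: rest) k
      = if pvHashB e.1.toList == k then e.2 :: pvG rest k else pvG rest k := by
  simp only [pvG, List.filter_cons]
  by_cases h : (pvHashB e.1.toList == k) = true <;> simp [h]

theorem pvInvP_cons (e : String × List String) (rest : List (String × List String))
    (h : pvInvP (e :: rest)) : e.2.getD 0 "" = e.1 ∧ pvInvP rest :=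
  ⟨h e (List.mem_cons_self ..), fun x hx => h x (List.mem_cons_of_mem _ hx)⟩

theorem pvEqPresent (L : List Char) (parts : List String) :
    ∀ (d : List (String × List String)), pvInvP d →
    d.any (fun e => e.1 == String.ofList L) = true → ∀ (k : Nat),
    pvG (pvSetVal d (String.ofList L) (parts.getD 1 "")) k
      = if k = pvHashB L then pvUpdA (pvG d k) L parts else pvG d k := by
  intro d
  induction d with
  | nil => intro _ hany; simp at hany
  | cons e rest ih =>
    intro hinv hany k
    obtain ⟨hinv0, hinv'⟩ := pvInvP_cons e rest hinv
    by_cases hb : (e.1 == String.ofList L) = true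
    · have he1 : e.1 = String.ofList L := eq_of_beq hb
      have hhash : pvHashB e.1.toList = pvHashB L := by rw [he1, String.toList_ofList]
      have hm : (((e.2.getD 0 "").toList == L) : Bool) = true := by
        rw [pvMatch_eq e L hinv0]; exact hb
      rw [show pvSetVal (e :: rest) (String.ofList L) (parts.getD 1 "")
            = (e.1, e.2.set 1 (parts.getD 1 "")) :: rest by simp [pvSetVal, hb]]
      by_cases hk : k = pvHashB L
      · subst hk
        have hmp : (e.2[0]?.getD "").toList = L := by simpa using hm
        simp [pvG_cons, hhash, pvUpdA, hmp]
      · simp [pvG_cons, hhash, hk, Ne.symm hk]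
    · have hb' : (e.1 == String.ofList L) = false := by
        cases h : (e.1 == String.ofList L) with
        | true => exact absurd h hb
        | false => rfl
      have hany' : rest.any (fun e => e.1 == String.ofList L) = true := by
        simp only [List.any_cons, hb', Bool.false_or] at hany; exact hany
      have hm : (((e.2.getD 0 "").toList == L) : Bool) = false := by
        rw [pvMatch_eq e L hinv0]; exact hb'
      rw [show pvSetVal (e :: rest) (String.ofList L) (parts.getD 1 "")
            = e :: pvSetVal rest (String.ofList L) (parts.getD 1 "") by simp [pvSetVal, hb']]
      rw [pvG_cons, pvG_cons, ih hinv' hany' k]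
      by_cases hk : (pvHashB e.1.toList == k) = true
      · by_cases hkh : k = pvHashB L
        · subst hkh
          have hkp : pvHashB e.1.toList = pvHashB L := by simpa using hk
          have hmp : ¬ (e.2[0]?.getD "").toList = L := by simpa using hm
          simp [hkp, pvUpdA, hmp]
        · simp [hk, hkh]
      · simp [hk]

theorem pvEqAbsent (L : List Char) (parts : List String) :
    ∀ (d : List (String × List String)), pvInvP d →
    d.any (fun e => e.1 == String.ofList L) = false → ∀ (k : Nat),
    pvUpdA (pvG d k) L parts = pvG d k ++ [parts] := by
  intro d
  induction d with
  | nil => intro _ _ k; simp [pvG, pvUpdA]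
  | cons e rest ih =>
    intro hinv hany k
    obtain ⟨hinv0, hinv'⟩ := pvInvP_cons e rest hinv
    simp only [List.any_cons, Bool.or_eq_false_iff] at hany
    have hm : (((e.2.getD 0 "").toList == L) : Bool) = false := by
      rw [pvMatch_eq e L hinv0]; exact hany.1
    rw [pvG_cons]
    by_cases hk : (pvHashB e.1.toList == k) = true
    · rw [if_pos hk]
      have hmp : ¬ (e.2[0]?.getD "").toList = L := by simpa using hm
      rw [show pvUpdA (e.2 :: pvG rest k) L parts
            = e.2 :: pvUpdA (pvG rest k) L parts by simp [pvUpdA, hmp]]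
      rw [ih hinv' hany.2 k]; rfl
    · rw [if_neg hk]
      exact ih hinv' hany.2 k

theorem pvGAppend (d : List (String × List String)) (e : String × List String) (k : Nat) :
    pvG (d ++ [e]) k = pvG d k ++ (if pvHashB e.1.toList == k then [e.2] else []) := by
  simp only [pvG, List.filter_append, List.map_append]
  by_cases h : (pvHashB e.1.toList == k) = true <;> simp [List.filter, h]

-- present key, '-' branch: pvDelKey on the dict is pvDelA inside box (hash L), identity elsewhere
theorem pvDelPresent (L : List Char) :
    ∀ (d : List (String × List String)), pvInvP d →
    d.any (fun e => e.1 == String.ofList L) = true → ∀ (k : Nat),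
    pvG (pvDelKey d (String.ofList L)) k
      = if k = pvHashB L then pvDelA (pvG d k) L else pvG d k := by
  intro d
  induction d with
  | nil => intro _ hany; simp at hany
  | cons e rest ih =>
    intro hinv hany k
    obtain ⟨hinv0, hinv'⟩ := pvInvP_cons e rest hinv
    by_cases hb : (e.1 == String.ofList L) = true
    · have he1 : e.1 = String.ofList L := eq_of_beq hb
      have hhash : pvHashB e.1.toList = pvHashB L := by rw [he1, String.toList_ofList]
      have hm : (((e.2.getD 0 "").toList == L) : Bool) = true := by
        rw [pvMatch_eq e L hinv0]; exact hb
      rw [show pvDelKey (e :: rest) (String.ofList L) = rest by simp [pvDelKey, hb]]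
      by_cases hk : k = pvHashB L
      · subst hk
        have hmp : (e.2[0]?.getD "").toList = L := by simpa using hm
        simp [pvG_cons, hhash, pvDelA, hmp]
      · simp [pvG_cons, hhash, hk, Ne.symm hk]
    · have hb' : (e.1 == String.ofList L) = false := by
        cases h : (e.1 == String.ofList L) with
        | true => exact absurd h hb
        | false => rfl
      have hany' : rest.any (fun e => e.1 == String.ofList L) = true := by
        simp only [List.any_cons, hb', Bool.false_or] at hany; exact hany
      have hm : (((e.2.getD 0 "").toList == L) : Bool) = false := by
        rw [pvMatch_eq e L hinv0]; exact hb'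
      rw [show pvDelKey (e :: rest) (String.ofList L)
            = e :: pvDelKey rest (String.ofList L) by simp [pvDelKey, hb']]
      rw [pvG_cons, pvG_cons, ih hinv' hany' k]
      by_cases hk : (pvHashB e.1.toList == k) = true
      · by_cases hkh : k = pvHashB L
        · subst hkh
          have hkp : pvHashB e.1.toList = pvHashB L := by simpa using hk
          have hmp : ¬ (e.2[0]?.getD "").toList = L := by simpa using hm
          simp [hkp, pvDelA, hmp]
        · simp [hk, hkh]
      · simp [hk]

theorem pvDelAbsent (L : List Char) :
    ∀ (d : List (String × List String)), pvInvP d →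
    d.any (fun e => e.1 == String.ofList L) = false → ∀ (k : Nat),
    pvDelA (pvG d k) L = pvG d k := by
  intro d
  induction d with
  | nil => intro _ _ k; simp [pvG, pvDelA]
  | cons e rest ih =>
    intro hinv hany k
    obtain ⟨hinv0, hinv'⟩ := pvInvP_cons e rest hinv
    simp only [List.any_cons, Bool.or_eq_false_iff] at hany
    have hm : (((e.2.getD 0 "").toList == L) : Bool) = false := by
      rw [pvMatch_eq e L hinv0]; exact hany.1
    rw [pvG_cons]
    by_cases hk : (pvHashB e.1.toList == k) = true
    · rw [if_pos hk]
      have hmp : ¬ (e.2[0]?.getD "").toList = L := by simpa using hm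
      rw [show pvDelA (e.2 :: pvG rest k) L
            = e.2 :: pvDelA (pvG rest k) L by simp [pvDelA, hmp]]
      rw [ih hinv' hany.2 k]
    · rw [if_neg hk]
      exact ih hinv' hany.2 k

-- invariant preservation
theorem pvInv_setVal (s x : String) :
    ∀ (d : List (String × List String)), pvInvP d → pvInvP (pvSetVal d s x) := by
  intro d
  induction d with
  | nil => intro _; simp [pvSetVal, pvInvP]
  | cons e rest ih =>
    intro hinv
    obtain ⟨hinv0, hinv'⟩ := pvInvP_cons e rest hinv
    by_cases hb : (e.1 == s) = true
    · rw [show pvSetVal (e :: rest) s x = (e.1, e.2.set 1 x) :: rest by simp [pvSetVal, hb]]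
      intro y hy
      rcases List.mem_cons.mp hy with h | h
      · subst h; simpa [pvSet1_getD0] using hinv0
      · exact hinv' y h
    · rw [show pvSetVal (e :: rest) s x = e :: pvSetVal rest s x by simp [pvSetVal, hb]]
      intro y hy
      rcases List.mem_cons.mp hy with h | h
      · subst h; exact hinv0
      · exact ih hinv' y h

theorem pvInv_delKey (s : String) :
    ∀ (d : List (String × List String)), pvInvP d → pvInvP (pvDelKey d s) := by
  intro d
  induction d with
  | nil => intro _; simp [pvDelKey, pvInvP]
  | cons e rest ih =>
    intro hinv
    obtain ⟨hinv0, hinv'⟩ := pvInvP_cons e rest hinv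
    by_cases hb : (e.1 == s) = true
    · rw [show pvDelKey (e :: rest) s = rest by simp [pvDelKey, hb]]
      exact hinv'
    · rw [show pvDelKey (e :: rest) s = e :: pvDelKey rest s by simp [pvDelKey, hb]]
      intro y hy
      rcases List.mem_cons.mp hy with h | h
      · subst h; exact hinv0
      · exact ih hinv' y h

-- first chunk of splitOn at '=': the prefix before the first '='
theorem pvGoAcc (sep : List Char) (fuel : Nat) :
    ∀ (l cur : List Char) (acc : List (List Char)),
    PySem.Chars.splitOn.go sep fuel l cur acc
      = acc.reverse ++ PySem.Chars.splitOn.go sep fuel l cur [] := by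
  induction fuel with
  | zero =>
    intro l cur acc
    rw [show ∀ acc', PySem.Chars.splitOn.go sep 0 l cur acc'
          = ((cur.reverse ++ l) :: acc').reverse from fun _ => rfl]
    rw [show PySem.Chars.splitOn.go sep 0 l cur [] = ((cur.reverse ++ l) :: []).reverse from rfl]
    simp
  | succ f ih =>
    intro l cur acc
    cases l with
    | nil =>
      rw [show ∀ acc', PySem.Chars.splitOn.go sep (f+1) [] cur acc'
            = (cur.reverse :: acc').reverse from fun _ => rfl]
      rw [show PySem.Chars.splitOn.go sep (f+1) [] cur [] = (cur.reverse :: []).reverse from rfl]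
      simp
    | cons c rest =>
      rw [show ∀ acc', PySem.Chars.splitOn.go sep (f+1) (c :: rest) cur acc'
            = if sep.isPrefixOf (c :: rest) then
                PySem.Chars.splitOn.go sep f (List.drop sep.length (c :: rest)) [] (cur.reverse :: acc')
              else PySem.Chars.splitOn.go sep f rest (c :: cur) acc' from fun _ => rfl]
      rw [show PySem.Chars.splitOn.go sep (f+1) (c :: rest) cur []
            = if sep.isPrefixOf (c :: rest) then
                PySem.Chars.splitOn.go sep f (List.drop sep.length (c :: rest)) [] (cur.reverse :: [])
              else PySem.Chars.splitOn.go sep f rest (c :: cur) [] from rfl]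
      by_cases hp : sep.isPrefixOf (c :: rest) = true
      · rw [if_pos hp, if_pos hp, ih _ _ (cur.reverse :: acc), ih _ _ (cur.reverse :: [])]
        simp
      · rw [if_neg hp, if_neg hp, ih rest (c :: cur) acc]

theorem pvGoHead (fuel : Nat) :
    ∀ (l cur : List Char) (i : Nat),
    l.length ≤ fuel → ∀ (hi : i < l.length),
    (∀ c ∈ l.take i, c ≠ '=') → l[i] = '=' →
    ∃ t, PySem.Chars.splitOn.go ['='] fuel l cur []
      = (cur.reverse ++ l.take i) :: t := by
  induction fuel with
  | zero =>
    intro l cur i hfuel hi _ _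
    omega
  | succ f ih =>
    intro l cur i hfuel hi hpre hc
    cases l with
    | nil => simp at hi
    | cons c rest =>
      rw [show PySem.Chars.splitOn.go ['='] (f+1) (c :: rest) cur []
            = if List.isPrefixOf ['='] (c :: rest) then
                PySem.Chars.splitOn.go ['='] f (List.drop 1 (c :: rest)) [] (cur.reverse :: [])
              else PySem.Chars.splitOn.go ['='] f rest (c :: cur) [] from rfl]
      have hpref : (List.isPrefixOf ['='] (c :: rest)) = (c == '=') := by
        simp [List.isPrefixOf, eq_comm]
      by_cases hce : c = '='
      · have hi0 : i = 0 := by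
          by_contra h0
          have h1 : 0 < i := Nat.pos_of_ne_zero h0
          have : c ∈ (c :: rest).take i := by
            cases i with
            | zero => omega
            | succ j => simp [List.take_succ_cons]
          exact hpre c this hce
        subst hi0
        rw [hpref, if_pos (by simp [hce])]
        rw [pvGoAcc]
        exact ⟨PySem.Chars.splitOn.go ['='] f (List.drop 1 (c :: rest)) [] [], by simp⟩
      · have hi1 : 0 < i := by
          by_contra h0
          have : i = 0 := by omega
          subst this
          exact hce (by simpa using hc)
        rw [hpref, if_neg (by simp [hce])]
        obtain ⟨j, hj⟩ : ∃ j, i = j + 1 := ⟨i - 1, by omega⟩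
        subst hj
        have hj2 : j < rest.length := by simpa using hi
        obtain ⟨t, ht⟩ := ih rest (c :: cur) j (by simpa using hfuel) hj2
          (fun x hx => hpre x (by simp [List.take_succ_cons]; exact Or.inr hx))
          (by simpa using hc)
        refine ⟨t, ?_⟩
        rw [ht]
        simp [List.take_succ_cons]

theorem pvSplitFirst (p : String) (i : Nat)
    (hi : i < p.toList.length)
    (hpre : ∀ c ∈ p.toList.take i, c ≠ '=')
    (hc : p.toList[i] = '=') :
    ((PySem.Str.split? p "=").getD []).getD 0 "" = String.ofList (p.toList.take i) := by
  obtain ⟨t, ht⟩ := pvGoHead (p.toList.length + 1) p.toList [] i (by omega) hi hpre hc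
  rw [show PySem.Str.split? p "="
        = Option.map (List.map String.ofList) (PySem.Chars.split? p.toList ['=']) from rfl]
  rw [show PySem.Chars.split? p.toList ['=']
        = some (PySem.Chars.splitOn p.toList ['=']) from by simp [PySem.Chars.split?]]
  rw [show PySem.Chars.splitOn p.toList ['=']
        = PySem.Chars.splitOn.go ['='] (p.toList.length + 1) p.toList [] [] from rfl]
  rw [ht]
  simp

-- one problem: A's step on the boxes view of the dict = boxes view of B's dict step
theorem pvStepMain (d : List (String × List String)) (p : String) (hinv : pvInvP d) :
    pvScanA ((List.range 256).map (pvG d)) p p.toList 0 [] = (List.range 256).map (pvG (pvStepB d p))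
      ∧ pvInvP (pvStepB d p) := by
  rw [pvScanA_eq p.toList 0 [] _ p (by simp)]
  unfold pvStepB
  cases hf : p.toList.findIdx? (fun c => c == '=' || c == '-') with
  | none => exact ⟨rfl, hinv⟩
  | some i =>
    obtain ⟨hi, hpi, hmin⟩ := List.findIdx?_eq_some_iff_getElem.mp hf
    simp only [List.nil_append]
    have hgdfact : p.toList.getD i ' ' = p.toList[i] := List.getD_eq_getElem _ _ hi
    have hlt := pvHashB_lt (p.toList.take i)
    have hgd : ((List.range 256).map (pvG d)).getD (pvHashB (p.toList.take i)) []
        = pvG d (pvHashB (p.toList.take i)) := pvGetDMapRange _ _ _ _ hlt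
    by_cases hce : (p.toList.getD i ' ' == '=') = true
    · -- '=' branch
      have hchar : p.toList[i] = '=' := by rw [← hgdfact]; exact eq_of_beq hce
      simp only [if_pos hce]
      by_cases hany : d.any (fun e => e.1 == String.ofList (p.toList.take i)) = true
      · simp only [if_pos hany]
        refine ⟨?_, pvInv_setVal _ _ d hinv⟩
        rw [hgd, pvSetMapRange _ _ _ _ hlt]
        apply List.map_congr_left
        intro k _
        rw [pvEqPresent (p.toList.take i) ((PySem.Str.split? p "=").getD []) d hinv hany k]
        by_cases hk : k = pvHashB (p.toList.take i)
        · rw [if_pos hk, if_pos hk, hk]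
        · rw [if_neg hk, if_neg hk]
      · have hany' : d.any (fun e => e.1 == String.ofList (p.toList.take i)) = false := by
          cases h : d.any (fun e => e.1 == String.ofList (p.toList.take i)) with
          | true => exact absurd h hany
          | false => rfl
        simp only [if_neg hany]
        have hpre : ∀ c ∈ p.toList.take i, c ≠ '=' := by
          intro c hc
          obtain ⟨j, hj, hjc⟩ := List.mem_take_iff_getElem.mp hc
          have hj1 : j < i := by omega
          have := hmin j hj1
          intro hceq
          rw [hjc, hceq] at this
          simp at this
        have hparts0 : ((PySem.Str.split? p "=").getD []).getD 0 ""
            = String.ofList (p.toList.take i) := pvSplitFirst p i hi hpre hchar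
        constructor
        · rw [hgd, pvSetMapRange _ _ _ _ hlt]
          apply List.map_congr_left
          intro k _
          rw [pvGAppend]
          rw [String.toList_ofList]
          by_cases hk : k = pvHashB (p.toList.take i)
          · subst hk
            rw [if_pos rfl]
            rw [pvEqAbsent (p.toList.take i) ((PySem.Str.split? p "=").getD []) d hinv hany' _]
            simp
          · have hbeq : (pvHashB (p.toList.take i) == k) = false := by simp [Ne.symm hk]
            rw [if_neg hk, hbeq]; simp
        · intro y hy
          rcases List.mem_append.mp hy with h | h
          · exact hinv y h
          · rw [List.mem_singleton.mp h]
            exact hparts0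
    · -- '-' branch
      simp only [if_neg hce]
      by_cases hany : d.any (fun e => e.1 == String.ofList (p.toList.take i)) = true
      · simp only [if_pos hany]
        refine ⟨?_, pvInv_delKey _ d hinv⟩
        rw [hgd, pvSetMapRange _ _ _ _ hlt]
        apply List.map_congr_left
        intro k _
        rw [pvDelPresent (p.toList.take i) d hinv hany k]
        by_cases hk : k = pvHashB (p.toList.take i)
        · rw [if_pos hk, if_pos hk, hk]
        · rw [if_neg hk, if_neg hk]
      · have hany' : d.any (fun e => e.1 == String.ofList (p.toList.take i)) = false := by
          cases h : d.any (fun e => e.1 == String.ofList (p.toList.take i)) with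
          | true => exact absurd h hany
          | false => rfl
        simp only [if_neg hany]
        refine ⟨?_, hinv⟩
        rw [hgd, pvSetMapRange _ _ _ _ hlt]
        apply List.map_congr_left
        intro k _
        rw [show pvDelA (pvG d (pvHashB (p.toList.take i))) (p.toList.take i)
              = pvG d (pvHashB (p.toList.take i)) from
            pvDelAbsent (p.toList.take i) d hinv hany' _]
        by_cases hk : k = pvHashB (p.toList.take i)
        · rw [if_pos hk, hk]
        · rw [if_neg hk]

-- B's final grouping pass computes the boxes view of the dict
theorem pvG_nil_map :
    (List.range 256).map (pvG []) = List.replicate 256 ([] : List (List String)) := by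
  rw [show pvG ([] : List (String × List String)) = fun _ => [] from rfl]
  rw [List.map_const', List.length_range]

theorem pvBuild_eq (d : List (String × List String)) :
    d.foldl
      (fun boxes e =>
        boxes.set (pvHashB e.1.toList) ((boxes.getD (pvHashB e.1.toList) []) ++ [e.2]))
      (List.replicate 256 [])
      = (List.range 256).map (pvG d) := by
  induction d using List.reverseRecOn with
  | nil => rw [pvG_nil_map]; rfl
  | append_singleton rest e ih =>
    rw [List.foldl_append, List.foldl_cons, List.foldl_nil, ih]
    rw [pvGetDMapRange _ _ _ _ (pvHashB_lt e.1.toList)]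
    rw [pvSetMapRange _ _ _ _ (pvHashB_lt e.1.toList)]
    apply List.map_congr_left
    intro k _
    rw [pvGAppend]
    by_cases hk : k = pvHashB e.1.toList
    · simp [hk]
    · have : (pvHashB e.1.toList == k) = false := by
        simp [Ne.symm hk]
      simp [hk, this]

theorem pvFoldMain (ps : List String) (d : List (String × List String)) (hinv : pvInvP d) :
    ps.foldl (fun b p => pvScanA b p p.toList 0 []) ((List.range 256).map (pvG d))
      = (List.range 256).map (pvG (ps.foldl pvStepB d)) := by
  induction ps generalizing d with
  | nil => rfl
  | cons p ps ih =>
    obtain ⟨h1, h2⟩ := pvStepMain d p hinv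
    simp only [List.foldl_cons, h1]
    exact ih _ h2

-- ===== VERDICT (by name: the statement is the Claim_ definition above) =====
theorem get_label_hash_values_spec : Claim_equal_get_label_hash_values := by
  intro problems _
  unfold Spec_get_label_hash_values get_label_hash_values get_label_hash_values_alt
  rw [pvInit_eq, pvBuild_eq]
  rw [← pvG_nil_map, pvFoldMain problems [] (by intro e he; cases he)]
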